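-- pv_equiv track=rewrite | github.com/KarimAziev/picar-x-racer | backend/app/modules/vilib.py | prioritize_cameras
-- ===== SOURCE A (Python) =====
-- from typing import Optional, List, Tuple
--
-- CameraInfo = Tuple[int, str, Optional[str]]
--
-- def prioritize_cameras(available_cameras: List[CameraInfo]):
--     color_cameras: List[CameraInfo] = []
--     greyscale_cameras: List[CameraInfo] = []
--
--     for index, device_path, device_info in available_cameras:
--         if device_info and "8-bit Greyscale" in device_info:
--             greyscale_cameras.append((index, device_path, device_info))
--         else:
--             color_cameras.append((index, device_path, device_info))
--
--     if color_cameras: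
--         return color_cameras[0]
--     elif greyscale_cameras:
--         return greyscale_cameras[0]
--     else:
--         return None, None, None
-- ===== SOURCE B (Python) =====
-- from typing import Optional, List, Tuple
--
-- CameraInfo = Tuple[int, str, Optional[str]]
--
-- def prioritize_cameras(available_cameras: List[CameraInfo]):
--     color = next(
--         (c for c in available_cameras
--          if not (c[2] and "8-bit Greyscale" in c[2])),
--         None,
--     )
--     if color:
--         return color
--     grey = next(
--         (c for c in available_cameras
--          if c[2] and "8-bit Greyscale" in c[2]),
--         None,
--     )
--     if grey:
--         return grey
--     return None, None, None
-- ===== Notes on version B (the rewrite author's own statement) =====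
-- stated objective: idiomatic
-- what changed: Replaces the full partition into two intermediate lists with two short-circuiting next() searches (first non-greyscale camera, else first greyscale camera), maintaining no intermediate lists.
import Mathlib
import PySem

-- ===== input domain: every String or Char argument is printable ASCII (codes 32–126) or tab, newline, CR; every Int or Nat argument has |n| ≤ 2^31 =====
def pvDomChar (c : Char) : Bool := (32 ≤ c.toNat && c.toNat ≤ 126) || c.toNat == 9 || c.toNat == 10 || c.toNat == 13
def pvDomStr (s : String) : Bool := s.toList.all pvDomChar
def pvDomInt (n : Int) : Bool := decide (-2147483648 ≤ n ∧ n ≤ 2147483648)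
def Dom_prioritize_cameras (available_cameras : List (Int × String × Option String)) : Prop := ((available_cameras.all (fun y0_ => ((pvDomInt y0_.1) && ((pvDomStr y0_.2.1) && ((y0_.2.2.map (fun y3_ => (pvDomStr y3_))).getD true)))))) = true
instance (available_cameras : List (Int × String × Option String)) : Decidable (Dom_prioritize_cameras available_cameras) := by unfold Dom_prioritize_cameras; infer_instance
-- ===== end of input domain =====

-- B replaces A's partition into two intermediate lists by two short-circuiting searches (idiomatic, same O(n) cost).


-- ===== PORT A =====
-- 'device_info and "8-bit Greyscale" in device_info' (truthiness: None and "" are falsy)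
def pvGrey (info : Option String) : Bool :=
  match info with
  | none => false
  | some s => decide (s ≠ "") && PySem.Str.isIn "8-bit Greyscale" s

def prioritize_cameras (available_cameras : List (Int × String × Option String)) : Option Int × Option String × Option String :=
  let lists := available_cameras.foldl
    (fun (acc : List (Int × String × Option String) × List (Int × String × Option String)) cam =>
      if pvGrey cam.2.2 then (acc.1, acc.2 ++ [cam]) else (acc.1 ++ [cam], acc.2))
    ([], [])
  match lists.1 with
  | c :: _ => (some c.1, some c.2.1, c.2.2)
  | [] =>
    match lists.2 with
    | g :: _ => (some g.1, some g.2.1, g.2.2)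
    | [] => (none, none, none)

-- ===== PORT B =====
def prioritize_cameras_alt (available_cameras : List (Int × String × Option String)) : Option Int × Option String × Option String :=
  match available_cameras.find? (fun c => !pvGrey c.2.2) with
  | some c => (some c.1, some c.2.1, c.2.2)
  | none =>
    match available_cameras.find? (fun c => pvGrey c.2.2) with
    | some g => (some g.1, some g.2.1, g.2.2)
    | none => (none, none, none)

-- ===== PRECONDITION & SPEC =====
def Spec_prioritize_cameras (available_cameras : List (Int × String × Option String)) (out : Option Int × Option String × Option String) : Prop := out = prioritize_cameras_alt available_cameras
instance (available_cameras : List (Int × String × Option String)) (out : Option Int × Option String × Option String) : Decidable (Spec_prioritize_cameras available_cameras out) := by unfold Spec_prioritize_cameras; infer_instance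

-- ===== CLAIM (what is proved, stated in full; the proofs are below) =====
def Claim_equal_prioritize_cameras : Prop := ∀ (available_cameras : List (Int × String × Option String)), Dom_prioritize_cameras available_cameras → Spec_prioritize_cameras available_cameras (prioritize_cameras available_cameras)

-- ===== LEMMAS AND PROOFS =====

-- A's partition loop produces the two filtered sublists, appended to the accumulators.
theorem pv_loopA_eq (xs : List (Int × String × Option String))
    (cs gs : List (Int × String × Option String)) :
    xs.foldl
      (fun (acc : List (Int × String × Option String) × List (Int × String × Option String)) cam =>
        if pvGrey cam.2.2 then (acc.1, acc.2 ++ [cam]) else (acc.1 ++ [cam], acc.2))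
      (cs, gs)
    = (cs ++ xs.filter (fun c => !pvGrey c.2.2), gs ++ xs.filter (fun c => pvGrey c.2.2)) := by
  induction xs generalizing cs gs with
  | nil => simp
  | cons x xs ih =>
    by_cases h : pvGrey x.2.2 = true <;>
      simp [List.foldl_cons, h, ih]

theorem pv_find?_eq_head?_filter {α : Type} (p : α → Bool) (xs : List α) :
    xs.find? p = (xs.filter p).head? := by
  induction xs with
  | nil => rfl
  | cons x xs ih =>
    by_cases h : p x = true
    · rw [List.find?_cons_of_pos h, List.filter_cons_of_pos h, List.head?_cons]
    · rw [List.find?_cons_of_neg (by simp [h]), List.filter_cons_of_neg (by simp [h]), ih]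

-- ===== VERDICT (by name: the statement is the Claim_ definition above) =====
theorem prioritize_cameras_spec : Claim_equal_prioritize_cameras := by
  intro xs _
  unfold Spec_prioritize_cameras prioritize_cameras prioritize_cameras_alt
  rw [pv_loopA_eq]
  rw [pv_find?_eq_head?_filter, pv_find?_eq_head?_filter]
  simp only [List.nil_append]
  cases hc : xs.filter (fun c => !pvGrey c.2.2) <;>
    cases hg : xs.filter (fun c => pvGrey c.2.2) <;>
      first | simp [hc] | simp [hc, hg]
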